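-- pv_equiv track=rewrite | github.com/MaxLZp/codewars | tests-python/7_MultiplyAdjacentDigits/test_multiply_adjacent_digits.py | digit_multiplication
-- ===== SOURCE A (Python) =====
-- def digit_multiplication(expression):
--     result = 0
--     current = 1
--
--     for n in expression[::-1]:
--         if n == '+':
--             result += int(current)
--             current = 1
--         elif n == '-':
--             result -= int(current)
--             current = 1
--         else:
--             current *= int(n)
--     result += int(current)
--
--     return result
-- ===== SOURCE B (Python) =====
-- def digit_multiplication(expression):
--     # Tokenize into alternating digit-runs and sign tokens, then evaluate forward.
--     parts = ['']
--     for ch in expression: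
--         if ch == '+' or ch == '-':
--             parts.append(ch)
--             parts.append('')
--         else:
--             parts[-1] += ch
--     result = 0
--     sign = 1
--     for part in parts:
--         if part == '+':
--             sign = 1
--         elif part == '-':
--             sign = -1
--         else:
--             prod = 1
--             for d in part:
--                 prod *= int(d)
--             result += sign * prod
--     return result
-- ===== Notes on version B (the rewrite author's own statement) =====
-- stated objective: idiomatic
-- what changed: B tokenizes the expression forward into alternating digit-runs and sign tokens and then evaluates the token list with a pending sign, instead of A's single reversed scan with a running product flushed at each sign.
import Mathlib
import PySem

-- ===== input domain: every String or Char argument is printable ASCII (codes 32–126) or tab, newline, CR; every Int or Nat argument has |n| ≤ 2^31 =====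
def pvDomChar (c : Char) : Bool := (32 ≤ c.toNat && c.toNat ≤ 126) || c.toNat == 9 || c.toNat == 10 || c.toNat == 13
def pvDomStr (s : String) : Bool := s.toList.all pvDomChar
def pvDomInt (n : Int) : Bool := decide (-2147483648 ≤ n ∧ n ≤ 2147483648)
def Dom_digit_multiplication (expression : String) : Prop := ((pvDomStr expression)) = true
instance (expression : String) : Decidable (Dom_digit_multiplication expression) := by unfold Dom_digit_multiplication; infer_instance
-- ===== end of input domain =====

-- B replaces A's reversed running-product scan by a forward tokenize-then-evaluate decomposition (idiomatic; same cost).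


-- ===== PORT A =====
-- int(n) for a one-character string n; the getD 0 default is only reached outside Pre_ (Python raises ValueError there)
def pvDigitValA (c : Char) : Int := (PySem.Int.ofStr? (String.ofList [c])).getD 0

-- expression[::-1] ported via List.reverse (PySem.Str.slice?_none_none_neg_one: s[::-1] is the reverse)
def digit_multiplication (expression : String) : Int :=
  let st := (expression.toList.reverse).foldl
    (fun (rc : Int × Int) n =>
      if n = '+' then (rc.1 + rc.2, 1)
      else if n = '-' then (rc.1 - rc.2, 1)
      else (rc.1, rc.2 * pvDigitValA n))
    (0, 1)
  st.1 + st.2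

-- ===== PORT B =====
-- int(d) for a one-character string d (B's own copy; same PySem primitive)
def pvDigitValB (c : Char) : Int := (PySem.Int.ofStr? (String.ofList [c])).getD 0

-- tokenizer loop: state = (finished parts, current run); 'parts[-1] += ch' / append sign token and a fresh run
def pvTokStep (st : List (List Char) × List Char) (ch : Char) : List (List Char) × List Char :=
  if ch = '+' ∨ ch = '-' then (st.1 ++ [st.2, [ch]], []) else (st.1, st.2 ++ [ch])

def pvTokenize (l : List Char) : List (List Char) :=
  let st := l.foldl pvTokStep ([], [])
  st.1 ++ [st.2]

def pvProd (part : List Char) : Int := part.foldl (fun p d => p * pvDigitValB d) 1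

def pvEvalStep (st : Int × Int) (part : List Char) : Int × Int :=
  if part = ['+'] then (st.1, 1)
  else if part = ['-'] then (st.1, -1)
  else (st.1 + st.2 * pvProd part, 1)

def digit_multiplication_alt (expression : String) : Int :=
  ((pvTokenize expression.toList).foldl pvEvalStep (0, 1)).1

-- ===== PRECONDITION & SPEC =====
-- Pre_ excludes exactly the inputs where Python's int(ch) raises ValueError (a char that is neither a digit nor '+'/'-'); both Pythons raise there.
def Pre_digit_multiplication (expression : String) : Prop :=
  (expression.toList.all (fun c => c.isDigit || c == '+' || c == '-')) = true
instance (expression : String) : Decidable (Pre_digit_multiplication expression) := by unfold Pre_digit_multiplication; infer_instance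

def pvWitness_digit_multiplication : String := "23+4-5"

def Spec_digit_multiplication (expression : String) (out : Int) : Prop := out = digit_multiplication_alt expression
instance (expression : String) (out : Int) : Decidable (Spec_digit_multiplication expression out) := by unfold Spec_digit_multiplication; infer_instance

-- ===== CLAIM (what is proved, stated in full; the proofs are below) =====
def Claim_equal_digit_multiplication : Prop := ∀ (expression : String), Dom_digit_multiplication expression → Pre_digit_multiplication expression → Spec_digit_multiplication expression (digit_multiplication expression)

-- ===== LEMMAS AND PROOFS =====

-- A's loop as a structural right-recursion (foldl over the reverse = foldr)
def pvAFold (l : List Char) : Int × Int :=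
  match l with
  | [] => (0, 1)
  | c :: t =>
    let rc := pvAFold t
    if c = '+' then (rc.1 + rc.2, 1)
    else if c = '-' then (rc.1 - rc.2, 1)
    else (rc.1, rc.2 * pvDigitValB c)

lemma pvAFold_eq (l : List Char) :
    (l.reverse).foldl
      (fun (rc : Int × Int) n =>
        if n = '+' then (rc.1 + rc.2, 1)
        else if n = '-' then (rc.1 - rc.2, 1)
        else (rc.1, rc.2 * pvDigitValA n)) (0, 1) = pvAFold l := by
  have hv : pvDigitValA = pvDigitValB := rfl
  rw [List.foldl_reverse, hv]
  induction l with
  | nil => rfl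
  | cons c t ih => simp only [List.foldr_cons, pvAFold, ih]

-- recursive form of the tokenizer
def pvTok (l : List Char) : List (List Char) :=
  match l with
  | [] => [[]]
  | c :: t =>
    if c = '+' ∨ c = '-' then [] :: [c] :: pvTok t
    else (c :: (pvTok t).headI) :: (pvTok t).tail

lemma pvTok_ne_nil (l : List Char) : pvTok l ≠ [] := by
  cases l with
  | nil => simp [pvTok]
  | cons c t => simp only [pvTok]; split <;> simp

-- the foldl tokenizer from a general state equals acc ++ (cur ++ first run) :: rest
lemma pvTokFold_eq (l : List Char) : ∀ (a : List (List Char)) (cur : List Char),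
    (let st := l.foldl pvTokStep (a, cur); st.1 ++ [st.2])
      = a ++ (cur ++ (pvTok l).headI) :: (pvTok l).tail := by
  induction l with
  | nil => intro a cur; simp [pvTok]
  | cons c t ih =>
    intro a cur
    simp only [List.foldl_cons, pvTok, pvTokStep]
    by_cases h : c = '+' ∨ c = '-'
    · simp only [if_pos h]
      rw [ih]
      have hne := pvTok_ne_nil t
      cases htok : pvTok t with
      | nil => exact absurd htok hne
      | cons p ps => simp
    · simp only [if_neg h]
      rw [ih]
      have hne := pvTok_ne_nil t
      cases htok : pvTok t with
      | nil => exact absurd htok hne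
      | cons p ps => simp

lemma pvTokenize_eq (l : List Char) : pvTokenize l = pvTok l := by
  have h := pvTokFold_eq l [] []
  have hne := pvTok_ne_nil l
  cases htok : pvTok l with
  | nil => exact absurd htok hne
  | cons p ps =>
    rw [htok] at h
    simpa [pvTokenize] using h

lemma pvProd_factor (q : List Char) (a : Int) :
    q.foldl (fun p d => p * pvDigitValB d) a = a * pvProd q := by
  induction q generalizing a with
  | nil => simp [pvProd]
  | cons d t ih =>
    simp only [pvProd, List.foldl_cons] at *
    rw [ih, ih (1 * pvDigitValB d)]
    ring

lemma pvCons_prod (c : Char) (p : List Char) : pvProd (c :: p) = pvDigitValB c * pvProd p := by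
  have h := pvProd_factor p (1 * pvDigitValB c)
  simp only [pvProd, List.foldl_cons] at *
  rw [h]
  ring

-- key invariant linking B's token evaluation to A's running state
lemma pvMain (l : List Char) :
    (∀ r s : Int, ((pvTok l).foldl pvEvalStep (r, s)).1 = r + s * (pvAFold l).2 + (pvAFold l).1)
      ∧ pvProd ((pvTok l).headI) = (pvAFold l).2
      ∧ (∀ x : Int, ((pvTok l).tail.foldl pvEvalStep (x, 1)).1 = x + (pvAFold l).1) := by
  induction l with
  | nil =>
    refine ⟨?_, ?_, ?_⟩
    · intro r s; simp [pvTok, pvAFold, pvEvalStep, pvProd]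
    · simp [pvTok, pvAFold, pvProd]
    · intro x; simp [pvTok, pvAFold]
  | cons c t ih =>
    obtain ⟨ihI, ihJ, ihK⟩ := ih
    by_cases hp : c = '+'
    · subst hp
      refine ⟨?_, ?_, ?_⟩
      · intro r s
        have h1 : pvEvalStep (r, s) [] = (r + s * 1, 1) := by simp [pvEvalStep, pvProd]
        have h2 : pvEvalStep (r + s * 1, 1) ['+'] = (r + s * 1, 1) := by simp [pvEvalStep]
        simp only [pvTok, pvAFold, true_or, if_true, List.foldl_cons, h1, h2, ihI]
        ring
      · simp [pvTok, pvAFold, pvProd]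
      · intro x
        have h2 : pvEvalStep (x, 1) ['+'] = (x, 1) := by simp [pvEvalStep]
        simp only [pvTok, pvAFold, true_or, if_true, List.tail_cons, List.foldl_cons, h2, ihI]
        ring
    · by_cases hm : c = '-'
      · subst hm
        refine ⟨?_, ?_, ?_⟩
        · intro r s
          have h1 : pvEvalStep (r, s) [] = (r + s * 1, 1) := by simp [pvEvalStep, pvProd]
          have h2 : pvEvalStep (r + s * 1, 1) ['-'] = (r + s * 1, -1) := by simp [pvEvalStep]
          simp only [pvTok, pvAFold, or_true, if_true, if_neg (by decide : ¬('-' = '+')),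
            List.foldl_cons, h1, h2, ihI]
          ring
        · simp [pvTok, pvAFold, pvProd]
        · intro x
          have h2 : pvEvalStep (x, 1) ['-'] = (x, -1) := by simp [pvEvalStep]
          simp only [pvTok, pvAFold, or_true, if_true, if_neg (by decide : ¬('-' = '+')),
            List.tail_cons, List.foldl_cons, h2, ihI]
          ring
      · have hns : ¬(c = '+' ∨ c = '-') := by tauto
        have hstep : ∀ st : Int × Int, pvEvalStep st (c :: (pvTok t).headI)
            = (st.1 + st.2 * pvProd (c :: (pvTok t).headI), 1) := by
          intro st
          have h1 : c :: (pvTok t).headI ≠ ['+'] := by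
            intro h; exact hp (by injection h)
          have h2 : c :: (pvTok t).headI ≠ ['-'] := by
            intro h; exact hm (by injection h)
          simp [pvEvalStep, h1, h2]
        refine ⟨?_, ?_, ?_⟩
        · intro r s
          simp only [pvTok, pvAFold, if_neg hns, if_neg hp, if_neg hm, List.foldl_cons]
          rw [hstep, ihK, pvCons_prod, ihJ]
          ring
        · simp only [pvTok, pvAFold, if_neg hns, if_neg hp, if_neg hm, List.headI_cons]
          rw [pvCons_prod, ihJ]
          ring
        · intro x
          simp only [pvTok, pvAFold, if_neg hns, if_neg hp, if_neg hm, List.tail_cons]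
          exact ihK x

-- ===== VERDICT (by name: the statement is the Claim_ definition above) =====
theorem digit_multiplication_spec : Claim_equal_digit_multiplication := by
  intro expression _ _
  unfold Spec_digit_multiplication digit_multiplication digit_multiplication_alt
  rw [pvAFold_eq, pvTokenize_eq, (pvMain expression.toList).1 0 1]
  ring
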